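-- pv_equiv track=rewrite | github.com/yyfsunnyboy/Mathproject_tvet_mathB | skills/gh_AverageValueOfContinuousFunctions.py | _evaluate_definite_integral
-- ===== SOURCE A (Python) =====
-- import math
--
-- def _integrate_polynomial(coeffs):
--     # coeffs = [c_n, c_{n-1}, ..., c_1, c_0]
--     integrated_coeffs = [] # [(numerator, denominator) for the coefficient of x^(power)]
--     for i, coeff in enumerate(reversed(coeffs)): # c_0, c_1*x, ..., c_n*x^n
--         power = i
--         new_coeff_num = coeff
--         new_coeff_den = power + 1
--         integrated_coeffs.append((new_coeff_num, new_coeff_den))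
--
--     # Reverse to get [C_{n+1}, C_n, ...] order for evaluation (highest power first)
--     integrated_coeffs.reverse()
--     return integrated_coeffs
--
-- def _evaluate_definite_integral(coeffs, a, b):
--     integrated_coeffs_raw = _integrate_polynomial(coeffs)
--
--     val_b_num = 0
--     val_b_den = 1
--     val_a_num = 0
--     val_a_den = 1
--
--     # Evaluate at b
--     for i, (num_coeff, den_coeff) in enumerate(integrated_coeffs_raw):
--         # Power for this term is (len of integrated_coeffs_raw - i)
--         # because integrated_coeffs_raw is highest power first
--         power = len(integrated_coeffs_raw) - i
--
--         term_num = num_coeff * (b ** power)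
--         term_den = den_coeff
--
--         # Add fractions (A/B + C/D = (AD+BC)/BD)
--         new_val_b_num = val_b_num * term_den + term_num * val_b_den
--         new_val_b_den = val_b_den * term_den
--
--         common = math.gcd(abs(new_val_b_num), abs(new_val_b_den))
--         val_b_num = new_val_b_num // common
--         val_b_den = new_val_b_den // common
--
--     # Evaluate at a
--     for i, (num_coeff, den_coeff) in enumerate(integrated_coeffs_raw):
--         power = len(integrated_coeffs_raw) - i
--
--         term_num = num_coeff * (a ** power)
--         term_den = den_coeff
--
--         new_val_a_num = val_a_num * term_den + term_num * val_a_den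
--         new_val_a_den = val_a_den * term_den
--
--         common = math.gcd(abs(new_val_a_num), abs(new_val_a_den))
--         val_a_num = new_val_a_num // common
--         val_a_den = new_val_a_den // common
--
--     # Subtract F(b) - F(a)
--     integral_num = val_b_num * val_a_den - val_a_num * val_b_den
--     integral_den = val_b_den * val_a_den
--
--     common = math.gcd(abs(integral_num), abs(integral_den))
--     integral_num //= common
--     integral_den //= common
--
--     return integral_num, integral_den
-- ===== SOURCE B (Python) =====
-- import math
--
-- def _evaluate_definite_integral(coeffs, a, b):
--     # Horner evaluation of the antiderivative F at b and a over exact fractions,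
--     # with a single gcd reduction at the end.
--     n = len(coeffs)
--
--     def F(x):
--         num, den = 0, 1
--         for i, c in enumerate(coeffs):
--             d = n - i  # denominator (= power) of this term's antiderivative coefficient
--             num, den = num * x * d + c * den, den * d
--         return num * x, den
--
--     bn, bd = F(b)
--     an, ad = F(a)
--     num = bn * ad - an * bd
--     den = bd * ad
--     g = math.gcd(abs(num), abs(den))
--     return num // g, den // g
-- ===== Notes on version B (the rewrite author's own statement) =====
-- stated objective: faster
-- what changed: Replaces per-term power computation (b**power) and a gcd-reduction after every fraction addition with a single Horner-style O(n) pass over one unreduced numerator/denominator pair per endpoint, reducing by gcd once at the end.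
import Mathlib
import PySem

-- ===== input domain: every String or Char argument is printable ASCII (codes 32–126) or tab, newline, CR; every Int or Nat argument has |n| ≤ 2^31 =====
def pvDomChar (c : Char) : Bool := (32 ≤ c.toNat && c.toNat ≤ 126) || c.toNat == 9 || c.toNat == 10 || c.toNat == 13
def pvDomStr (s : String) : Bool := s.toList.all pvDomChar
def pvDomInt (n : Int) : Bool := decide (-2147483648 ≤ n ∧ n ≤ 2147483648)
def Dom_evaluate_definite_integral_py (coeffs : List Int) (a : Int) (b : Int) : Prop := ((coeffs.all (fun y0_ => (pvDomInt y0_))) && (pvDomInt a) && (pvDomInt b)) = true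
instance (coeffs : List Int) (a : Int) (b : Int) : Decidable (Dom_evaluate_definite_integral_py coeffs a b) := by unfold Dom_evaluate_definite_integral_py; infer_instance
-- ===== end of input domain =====

-- B replaces A's per-term power computation and per-step gcd reduction with a single
-- Horner-style pass per endpoint over one unreduced fraction, reduced by gcd once at the end
-- (objective: faster).

-- ===== PORT A =====
-- _integrate_polynomial: append loop over enumerate(reversed(coeffs)) rendered as a map, then reverse
def integrate_polynomial_py (coeffs : List Int) : List (Int × Int) :=
  ((PySem.List.enumerate coeffs.reverse).map (fun p => (p.2, p.1 + 1))).reverse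

-- body of A's two identical evaluation loops (power = len - i; fraction add then gcd reduce)
def pyStepA (L : Nat) (x : Int) (st : Int × Int) (p : Int × (Int × Int)) : Int × Int :=
  let power : Nat := L - p.1.toNat
  let term_num := p.2.1 * x ^ power
  let term_den := p.2.2
  let new_num := st.1 * term_den + term_num * st.2
  let new_den := st.2 * term_den
  let common : Int := (Int.gcd new_num new_den : Int)
  (PySem.Int.floordiv new_num common, PySem.Int.floordiv new_den common)

def evaluate_definite_integral_py (coeffs : List Int) (a : Int) (b : Int) : Int × Int :=
  let icr := integrate_polynomial_py coeffs
  let vb := (PySem.List.enumerate icr).foldl (pyStepA icr.length b) (0, 1)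
  let va := (PySem.List.enumerate icr).foldl (pyStepA icr.length a) (0, 1)
  let inum := vb.1 * va.2 - va.1 * vb.2
  let iden := vb.2 * va.2
  let common : Int := (Int.gcd inum iden : Int)
  (PySem.Int.floordiv inum common, PySem.Int.floordiv iden common)

-- ===== PORT B =====
-- Horner step: acc := acc * x + c/(n - i), kept as one unreduced fraction
def pyStepB (n : Nat) (x : Int) (st : Int × Int) (q : Int × Int) : Int × Int :=
  let d : Int := (n : Int) - q.1
  (st.1 * x * d + q.2 * st.2, st.2 * d)

-- B's inner function F(x): Horner pass, then multiply by x
def hornerAnti (coeffs : List Int) (x : Int) : Int × Int :=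
  let p := (PySem.List.enumerate coeffs).foldl (pyStepB coeffs.length x) (0, 1)
  (p.1 * x, p.2)

def evaluate_definite_integral_py_alt (coeffs : List Int) (a : Int) (b : Int) : Int × Int :=
  let fb := hornerAnti coeffs b
  let fa := hornerAnti coeffs a
  let num := fb.1 * fa.2 - fa.1 * fb.2
  let den := fb.2 * fa.2
  let g : Int := (Int.gcd num den : Int)
  (PySem.Int.floordiv num g, PySem.Int.floordiv den g)

-- ===== PRECONDITION & SPEC =====
def Spec_evaluate_definite_integral_py (coeffs : List Int) (a : Int) (b : Int) (out : Int × Int) : Prop := out = evaluate_definite_integral_py_alt coeffs a b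
instance (coeffs : List Int) (a : Int) (b : Int) (out : Int × Int) : Decidable (Spec_evaluate_definite_integral_py coeffs a b out) := by unfold Spec_evaluate_definite_integral_py; infer_instance

-- ===== CLAIM (what is proved, stated in full; the proofs are below) =====
def Claim_equal_evaluate_definite_integral_py : Prop := ∀ (coeffs : List Int) (a : Int) (b : Int), Dom_evaluate_definite_integral_py coeffs a b → Spec_evaluate_definite_integral_py coeffs a b (evaluate_definite_integral_py coeffs a b)

-- ===== LEMMAS AND PROOFS =====

-- gcd-reduction of a pair, as both ports perform it
def canonP (nn nd : Int) : Int × Int :=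
  (PySem.Int.floordiv nn (Int.gcd nn nd), PySem.Int.floordiv nd (Int.gcd nn nd))

-- for a positive denominator, gcd-reduction yields exactly the (num, den) of the rational nn/nd
lemma canon_eq (nn nd : Int) (h : 0 < nd) :
    canonP nn nd = (((nn : ℚ) / (nd : ℚ)).num, (((nn : ℚ) / (nd : ℚ)).den : Int)) := by
  have hg : 0 < ((Int.gcd nn nd : Nat) : Int) := by
    have := Int.gcd_pos_of_ne_zero_right nn (by omega : nd ≠ 0)
    exact_mod_cast this
  rw [canonP, PySem.Int.floordiv_eq_ediv_of_pos hg, PySem.Int.floordiv_eq_ediv_of_pos hg]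
  rw [← Rat.divInt_eq_div, Rat.num_divInt, Rat.den_divInt]
  congr 1
  · rw [Int.sign_eq_one_of_pos h, one_mul, Int.gcd_comm nd nn]
  · rw [if_neg (by omega : nd ≠ 0), Int.gcd_comm nd nn, Int.natCast_ediv,
        Int.natAbs_of_nonneg (le_of_lt h)]

lemma canon_pos (nn nd : Int) (h : 0 < nd) : 0 < (canonP nn nd).2 := by
  rw [canon_eq nn nd h]
  show (0 : Int) < (((nn : ℚ) / (nd : ℚ)).den : Int)
  exact_mod_cast ((nn : ℚ) / (nd : ℚ)).pos

lemma canon_val (nn nd : Int) (h : 0 < nd) :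
    ((canonP nn nd).1 : ℚ) / ((canonP nn nd).2 : ℚ) = (nn : ℚ) / (nd : ℚ) := by
  rw [canon_eq nn nd h]
  exact Rat.num_div_den _

-- recursive view of A's integrated coefficient list
def integRec : List Int → List (Int × Int)
  | [] => []
  | c :: rest => (c, (rest.length : Int) + 1) :: integRec rest

lemma integ_eq (coeffs : List Int) : integrate_polynomial_py coeffs = integRec coeffs := by
  induction coeffs with
  | nil => rfl
  | cons c rest ih =>
    unfold integrate_polynomial_py integRec
    rw [List.reverse_cons, PySem.List.enumerate_append, PySem.List.enumerate_cons,
        PySem.List.enumerate_nil, List.map_append, List.reverse_append]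
    simp only [List.map_cons, List.map_nil, List.reverse_cons, List.reverse_nil, List.nil_append,
      List.length_reverse, zero_add, List.cons_append]
    rw [← integrate_polynomial_py, ih]

lemma integRec_length (coeffs : List Int) : (integRec coeffs).length = coeffs.length := by
  induction coeffs with
  | nil => rfl
  | cons c rest ih => simp [integRec, ih]

-- the exact rational value of the antiderivative sum, term by term (A's order)
def specSum (x : Int) : List Int → ℚ
  | [] => 0
  | c :: rest => (c : ℚ) * (x : ℚ) ^ (rest.length + 1) / ((rest.length : ℚ) + 1) + specSum x rest

-- the value produced by B's Horner pass before the final multiplication by x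
def hornerSum (x : Int) : List Int → ℚ
  | [] => 0
  | c :: rest => (c : ℚ) / ((rest.length : ℚ) + 1) * (x : ℚ) ^ rest.length + hornerSum x rest

lemma hornerSum_mul_x (x : Int) (cs : List Int) :
    hornerSum x cs * (x : ℚ) = specSum x cs := by
  induction cs with
  | nil => simp [hornerSum, specSum]
  | cons c rest ih =>
    simp only [hornerSum, specSum, add_mul, ih, pow_succ]
    ring_nf

-- invariant of A's evaluation loop
lemma Aloop (x : Int) (cs : List Int) : ∀ (s : Nat) (st : Int × Int), 0 < st.2 →
    0 < ((PySem.List.enumerate (integRec cs) (s : Int)).foldl (pyStepA (s + cs.length) x) st).2 ∧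
    ((((PySem.List.enumerate (integRec cs) (s : Int)).foldl (pyStepA (s + cs.length) x) st).1 : ℚ) /
      (((PySem.List.enumerate (integRec cs) (s : Int)).foldl (pyStepA (s + cs.length) x) st).2 : ℚ)
      = (st.1 : ℚ) / (st.2 : ℚ) + specSum x cs) := by
  induction cs with
  | nil =>
    intro s st hst
    simp [integRec, PySem.List.enumerate_nil, specSum, hst]
  | cons c rest ih =>
    intro s st hst
    have hlen : s + (c :: rest).length = (s + 1) + rest.length := by simp; omega
    have hstep : pyStepA (s + (c :: rest).length) x st ((s : Int), (c, (rest.length : Int) + 1))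
        = canonP (st.1 * ((rest.length : Int) + 1) + c * x ^ (rest.length + 1) * st.2)
                 (st.2 * ((rest.length : Int) + 1)) := by
      unfold pyStepA canonP
      have hp : (s + (c :: rest).length) - ((s : Int)).toNat = rest.length + 1 := by
        simp [Int.toNat_natCast]
      rw [hp]
    have hd : (0 : Int) < st.2 * ((rest.length : Int) + 1) := by positivity
    have hpos := canon_pos (st.1 * ((rest.length : Int) + 1) + c * x ^ (rest.length + 1) * st.2) (st.2 * ((rest.length : Int) + 1)) hd
    have hval := canon_val (st.1 * ((rest.length : Int) + 1) + c * x ^ (rest.length + 1) * st.2) (st.2 * ((rest.length : Int) + 1)) hd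
    rw [integRec, PySem.List.enumerate_cons, List.foldl_cons, hstep]
    have hcast : (s : Int) + 1 = ((s + 1 : Nat) : Int) := by push_cast; ring
    rw [hlen, hcast]
    obtain ⟨hp2, hv2⟩ := ih (s + 1) _ hpos
    refine ⟨hp2, ?_⟩
    rw [hv2, hval, specSum]
    have h2 : ((rest.length : ℚ) + 1) ≠ 0 := by positivity
    have h3 : (st.2 : ℚ) ≠ 0 := by exact_mod_cast (by omega : st.2 ≠ 0)
    push_cast
    field_simp
    ring

-- invariant of B's Horner loop
lemma Bloop (x : Int) (cs : List Int) : ∀ (s : Nat) (st : Int × Int), 0 < st.2 →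
    0 < ((PySem.List.enumerate cs (s : Int)).foldl (pyStepB (s + cs.length) x) st).2 ∧
    ((((PySem.List.enumerate cs (s : Int)).foldl (pyStepB (s + cs.length) x) st).1 : ℚ) /
      (((PySem.List.enumerate cs (s : Int)).foldl (pyStepB (s + cs.length) x) st).2 : ℚ)
      = (st.1 : ℚ) / (st.2 : ℚ) * (x : ℚ) ^ cs.length + hornerSum x cs) := by
  induction cs with
  | nil =>
    intro s st hst
    simp [PySem.List.enumerate_nil, hornerSum, hst]
  | cons c rest ih =>
    intro s st hst
    have hlen : s + (c :: rest).length = (s + 1) + rest.length := by simp; omega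
    have hstep : pyStepB (s + (c :: rest).length) x st ((s : Int), c)
        = (st.1 * x * ((rest.length : Int) + 1) + c * st.2, st.2 * ((rest.length : Int) + 1)) := by
      unfold pyStepB
      have hd : ((s + (c :: rest).length : Nat) : Int) - (s : Int) = (rest.length : Int) + 1 := by
        push_cast; simp
      rw [hd]
    have hd : (0 : Int) < st.2 * ((rest.length : Int) + 1) := by positivity
    rw [PySem.List.enumerate_cons, List.foldl_cons, hstep]
    have hcast : (s : Int) + 1 = ((s + 1 : Nat) : Int) := by push_cast; ring
    rw [hlen, hcast]
    obtain ⟨hp2, hv2⟩ := ih (s + 1) (st.1 * x * ((rest.length : Int) + 1) + c * st.2, st.2 * ((rest.length : Int) + 1)) hd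
    refine ⟨hp2, ?_⟩
    rw [hv2, hornerSum]
    have h2 : ((rest.length : ℚ) + 1) ≠ 0 := by positivity
    have h3 : (st.2 : ℚ) ≠ 0 := by exact_mod_cast (by omega : st.2 ≠ 0)
    simp only [List.length_cons, pow_succ]
    push_cast
    field_simp
    ring

-- combining F(b) and F(a): both ports end with the same gcd-reduced difference
lemma combine_eq (p q : Int × Int) (hp : 0 < p.2) (hq : 0 < q.2) (X Y : ℚ)
    (hpv : (p.1 : ℚ) / (p.2 : ℚ) = X) (hqv : (q.1 : ℚ) / (q.2 : ℚ) = Y) :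
    canonP (p.1 * q.2 - q.1 * p.2) (p.2 * q.2) = ((X - Y).num, ((X - Y).den : Int)) := by
  rw [canon_eq _ _ (mul_pos hp hq)]
  have hp' : (p.2 : ℚ) ≠ 0 := by exact_mod_cast (by omega : p.2 ≠ 0)
  have hq' : (q.2 : ℚ) ≠ 0 := by exact_mod_cast (by omega : q.2 ≠ 0)
  have : ((p.1 * q.2 - q.1 * p.2 : Int) : ℚ) / ((p.2 * q.2 : Int) : ℚ) = X - Y := by
    rw [← hpv, ← hqv]
    push_cast
    field_simp
  rw [this]

-- characterisation of A's per-endpoint loop result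
lemma A_eval (coeffs : List Int) (x : Int) :
    0 < ((PySem.List.enumerate (integrate_polynomial_py coeffs)).foldl
          (pyStepA (integrate_polynomial_py coeffs).length x) (0, 1)).2 ∧
    ((((PySem.List.enumerate (integrate_polynomial_py coeffs)).foldl
          (pyStepA (integrate_polynomial_py coeffs).length x) (0, 1)).1 : ℚ) /
      (((PySem.List.enumerate (integrate_polynomial_py coeffs)).foldl
          (pyStepA (integrate_polynomial_py coeffs).length x) (0, 1)).2 : ℚ)
      = specSum x coeffs) := by
  have h := Aloop x coeffs 0 (0, 1) (by norm_num)
  rw [integ_eq, integRec_length]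
  simpa using h

-- characterisation of B's F(x)
lemma B_eval (coeffs : List Int) (x : Int) :
    0 < (hornerAnti coeffs x).2 ∧
    (((hornerAnti coeffs x).1 : ℚ) / ((hornerAnti coeffs x).2 : ℚ) = specSum x coeffs) := by
  have h := Bloop x coeffs 0 (0, 1) (by norm_num)
  simp only [Nat.cast_zero, zero_add] at h
  obtain ⟨h1, h2⟩ := h
  have hz : (((0, 1) : Int × Int).1 : ℚ) / (((0, 1) : Int × Int).2 : ℚ) = 0 := by norm_num
  rw [hz, zero_mul, zero_add] at h2
  have hrw : hornerAnti coeffs x =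
      (((PySem.List.enumerate coeffs).foldl (pyStepB coeffs.length x) (0, 1)).1 * x,
       ((PySem.List.enumerate coeffs).foldl (pyStepB coeffs.length x) (0, 1)).2) := rfl
  rw [hrw]
  refine ⟨h1, ?_⟩
  push_cast
  rw [mul_div_right_comm, h2, hornerSum_mul_x]

-- ===== VERDICT (by name: the statement is the Claim_ definition above) =====
theorem evaluate_definite_integral_py_spec : Claim_equal_evaluate_definite_integral_py := by
  intro coeffs a b _dom
  unfold Spec_evaluate_definite_integral_py
  unfold evaluate_definite_integral_py evaluate_definite_integral_py_alt
  obtain ⟨hbp, hbv⟩ := A_eval coeffs b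
  obtain ⟨hap, hav⟩ := A_eval coeffs a
  obtain ⟨hbp', hbv'⟩ := B_eval coeffs b
  obtain ⟨hap', hav'⟩ := B_eval coeffs a
  have h1 := combine_eq _ _ hbp hap (specSum b coeffs) (specSum a coeffs) hbv hav
  have h2 := combine_eq _ _ hbp' hap' (specSum b coeffs) (specSum a coeffs) hbv' hav'
  show canonP _ _ = canonP _ _
  rw [h1, h2]
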